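-- pv_equiv track=rewrite | github.com/alexlim7/madate-vault | app/services/truststore_service.py | _validate_jwk
-- ===== SOURCE A (Python) =====
-- from typing import Dict, Optional, List
--
-- def _validate_jwk(jwk: Dict) -> bool:
--     """
--     Validate individual JWK.
--
--     Args:
--         jwk: JWK dictionary
--
--     Returns:
--         True if valid, False otherwise
--     """
--     try:
--         required_fields = ["kty", "kid"]
--         for field in required_fields:
--             if field not in jwk:
--                 return False
--
--         # Validate key type
--         kty = jwk["kty"]
--         if kty not in ["RSA", "EC", "oct"]:
--             return False
--
--         # "use" and "alg" are optional in modern JWK specs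
--         # If present, validate them
--         if "use" in jwk:
--             use = jwk["use"]
--             if use not in ["sig", "enc"]:
--                 return False
--
--         if "alg" in jwk:
--             alg = jwk["alg"]
--             if kty == "RSA" and alg not in ["RS256", "RS384", "RS512", "PS256", "PS384", "PS512"]:
--                 return False
--             elif kty == "EC" and alg not in ["ES256", "ES384", "ES512", "ES256K"]:
--                 return False
--             elif kty == "oct" and alg not in ["HS256", "HS384", "HS512"]:
--                 return False
--
--         # Validate RSA-specific fields
--         if kty == "RSA":
--             if "n" not in jwk or "e" not in jwk:
--                 return False
--
--         # Validate EC-specific fields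
--         elif kty == "EC":
--             if "crv" not in jwk or "x" not in jwk or "y" not in jwk:
--                 return False
--
--         return True
--
--     except Exception:
--         return False
-- ===== SOURCE B (Python) =====
-- # B: membership-driven validation — one scan of the items rejects any bad "use"/"alg"
-- # value, then a set-inclusion test checks that all fields required by the kty are present.
-- _USE_VALUES = frozenset({"sig", "enc"})
-- _ALGS = {
--     "RSA": frozenset({"RS256", "RS384", "RS512", "PS256", "PS384", "PS512"}),
--     "EC": frozenset({"ES256", "ES384", "ES512", "ES256K"}),
--     "oct": frozenset({"HS256", "HS384", "HS512"}),
-- }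
-- _REQUIRED = {
--     "RSA": frozenset({"kty", "kid", "n", "e"}),
--     "EC": frozenset({"kty", "kid", "crv", "x", "y"}),
--     "oct": frozenset({"kty", "kid"}),
-- }
--
--
-- def _validate_jwk(jwk):
--     kty = jwk.get("kty")
--     if kty not in _ALGS:
--         return False
--     if any((k == "use" and v not in _USE_VALUES) or (k == "alg" and v not in _ALGS[kty])
--            for k, v in jwk.items()):
--         return False
--     return jwk.keys() >= _REQUIRED[kty]
-- ===== Notes on version B (the rewrite author's own statement) =====
-- stated objective: idiomatic
-- what changed: Replaces A's sequence of per-field key lookups and per-kty branch chains by a membership-driven check: a single scan over the items rejects any bad 'use'/'alg' value, and a set-inclusion test (jwk.keys() >= required set) covers all presence checks including kty/kid at once.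
import Mathlib
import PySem

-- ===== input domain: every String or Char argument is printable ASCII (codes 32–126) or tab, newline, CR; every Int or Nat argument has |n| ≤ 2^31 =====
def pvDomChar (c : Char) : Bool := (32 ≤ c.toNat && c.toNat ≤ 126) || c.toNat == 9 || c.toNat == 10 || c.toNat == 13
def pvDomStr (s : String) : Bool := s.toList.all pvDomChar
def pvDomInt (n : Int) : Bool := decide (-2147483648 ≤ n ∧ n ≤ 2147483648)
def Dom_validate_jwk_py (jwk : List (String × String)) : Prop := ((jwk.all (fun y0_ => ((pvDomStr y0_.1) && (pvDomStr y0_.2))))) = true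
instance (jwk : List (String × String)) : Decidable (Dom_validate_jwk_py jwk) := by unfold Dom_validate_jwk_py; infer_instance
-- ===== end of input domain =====

-- B replaces per-field lookups and per-kty branch chains by one item scan plus a
-- required-keys set-inclusion test; objective: idiomatic, same result, return value only.

-- dict lookup (first match): value of key k, if present
def dget? (jwk : List (String × String)) (k : String) : Option String :=
  (jwk.find? (fun p => p.1 == k)).map (·.2)

-- 'k in jwk'
def dhas (jwk : List (String × String)) (k : String) : Bool :=
  (dget? jwk k).isSome

-- ===== PORT A =====
def validate_jwk_py (jwk : List (String × String)) : Bool :=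
  -- for field in ["kty","kid"]: if field not in jwk: return False
  if !(["kty", "kid"].all (fun f => dhas jwk f)) then false
  else
    let kty := (dget? jwk "kty").getD ""
    if !(["RSA", "EC", "oct"].contains kty) then false
    else if dhas jwk "use" &&
            !(["sig", "enc"].contains ((dget? jwk "use").getD "")) then false
    else if dhas jwk "alg" &&
            (let alg := (dget? jwk "alg").getD ""
             if kty == "RSA" then !(["RS256","RS384","RS512","PS256","PS384","PS512"].contains alg)
             else if kty == "EC" then !(["ES256","ES384","ES512","ES256K"].contains alg)
             else if kty == "oct" then !(["HS256","HS384","HS512"].contains alg)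
             else false) then false
    else if kty == "RSA" then (if !(dhas jwk "n") || !(dhas jwk "e") then false else true)
    else if kty == "EC" then (if !(dhas jwk "crv") || !(dhas jwk "x") || !(dhas jwk "y") then false else true)
    else true

-- ===== PORT B =====
-- _ALGS : kty ↦ allowed "alg" values   (frozensets of string literals ported as lists)
def jwkAlgs : List (String × List String) :=
  [("RSA", ["RS256","RS384","RS512","PS256","PS384","PS512"]),
   ("EC", ["ES256","ES384","ES512","ES256K"]),
   ("oct", ["HS256","HS384","HS512"])]

-- _REQUIRED : kty ↦ fields that must be present
def jwkRequired : List (String × List String) :=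
  [("RSA", ["kty","kid","n","e"]),
   ("EC", ["kty","kid","crv","x","y"]),
   ("oct", ["kty","kid"])]

def validate_jwk_py_alt (jwk : List (String × String)) : Bool :=
  match dget? jwk "kty" with          -- kty = jwk.get("kty"); None is not a key of _ALGS
  | none => false
  | some kty =>
    match jwkAlgs.lookup kty with
    | none => false                   -- kty not in _ALGS
    | some algs =>
      if jwk.any (fun p => (p.1 == "use" && !(["sig","enc"].contains p.2)) ||
                           (p.1 == "alg" && !(algs.contains p.2))) then false
      else ((jwkRequired.lookup kty).getD []).all (fun f => jwk.any (fun p => p.1 == f))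

-- ===== PRECONDITION & SPEC =====
-- Pre_ excludes association lists with duplicate keys: they do not represent any Python
-- dict (A's argument type), so neither behaviour there is specified by the source.
def Pre_validate_jwk_py (jwk : List (String × String)) : Prop :=
  (jwk.map Prod.fst).Nodup
instance (jwk : List (String × String)) : Decidable (Pre_validate_jwk_py jwk) := by
  unfold Pre_validate_jwk_py; infer_instance

def pvWitness_validate_jwk_py : (List (String × String)) := [("kty","oct"),("kid","1")]

def Spec_validate_jwk_py (jwk : List (String × String)) (out : Bool) : Prop := out = validate_jwk_py_alt jwk
instance (jwk : List (String × String)) (out : Bool) : Decidable (Spec_validate_jwk_py jwk out) := by unfold Spec_validate_jwk_py; infer_instance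

-- ===== CLAIM (what is proved, stated in full; the proofs are below) =====
def Claim_equal_validate_jwk_py : Prop := ∀ (jwk : List (String × String)), Dom_validate_jwk_py jwk → Pre_validate_jwk_py jwk → Spec_validate_jwk_py jwk (validate_jwk_py jwk)

-- ===== LEMMAS AND PROOFS =====

theorem not_none_eq_isSome (o : Option String) : (!decide (o = none)) = o.isSome := by
  cases o <;> simp

-- presence test: find?-based 'in' equals the any-based membership used by B
theorem dhas_eq_any (jwk : List (String × String)) (k : String) :
    dhas jwk k = jwk.any (fun p => p.1 == k) := by
  induction jwk with
  | nil => simp [dhas, dget?]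
  | cons hd tl ih =>
    by_cases hk : (hd.1 == k) = true <;>
      simp [dhas, dget?, List.any_cons, hk] <;>
      simpa [dhas, dget?] using ih

-- with nodup keys, scanning all items with key K equals checking the first-match value
theorem any_key_eq (jwk : List (String × String)) (K : String) (bad : String → Bool)
    (h : (jwk.map Prod.fst).Nodup) :
    jwk.any (fun p => p.1 == K && bad p.2)
      = (match dget? jwk K with | none => false | some v => bad v) := by
  induction jwk with
  | nil => simp [dget?]
  | cons hd tl ih =>
    simp only [List.map_cons, List.nodup_cons] at h
    by_cases hk : hd.1 = K
    · subst hk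
      have htl : tl.any (fun p => p.1 == hd.1 && bad p.2) = false := by
        rw [List.any_eq_false]
        intro p hp
        have : p.1 ≠ hd.1 := fun e => h.1 (e ▸ List.mem_map_of_mem hp)
        simp [this]
      simp [dget?, List.any_cons, htl]
    · have := ih h.2
      simp only [List.any_cons]
      rw [this]
      simp [dget?, hk]

theorem any_or_split (jwk : List (String × String)) (f g : String × String → Bool) :
    jwk.any (fun p => f p || g p) = (jwk.any f || jwk.any g) := by
  induction jwk with
  | nil => rfl
  | cons hd tl ih =>
    simp [List.any_cons, ih, Bool.or_assoc, Bool.or_left_comm]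

-- B's one scan equals the two first-match checks, given nodup keys
theorem any_two (jwk : List (String × String)) (b1 b2 : String → Bool)
    (hnd : (jwk.map Prod.fst).Nodup) :
    jwk.any (fun p => (p.1 == "use" && b1 p.2) || (p.1 == "alg" && b2 p.2))
      = ((match dget? jwk "use" with | none => false | some v => b1 v) ||
         (match dget? jwk "alg" with | none => false | some v => b2 v)) := by
  rw [any_or_split jwk (fun p => p.1 == "use" && b1 p.2) (fun p => p.1 == "alg" && b2 p.2),
      any_key_eq jwk "use" b1 hnd, any_key_eq jwk "alg" b2 hnd]

theorem validate_jwk_eq (jwk : List (String × String))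
    (hnd : (jwk.map Prod.fst).Nodup) :
    validate_jwk_py jwk = validate_jwk_py_alt jwk := by
  unfold validate_jwk_py validate_jwk_py_alt
  cases hkty : dget? jwk "kty" with
  | none =>
    have : dhas jwk "kty" = false := by simp [dhas, hkty]
    simp [this]
  | some kty =>
    have hktyhas : dhas jwk "kty" = true := by simp [dhas, hkty]
    by_cases h1 : kty = "RSA"
    · subst h1
      have hL : List.lookup "RSA" jwkAlgs
          = some ["RS256","RS384","RS512","PS256","PS384","PS512"] := rfl
      have hR : List.lookup "RSA" jwkRequired = some ["kty","kid","n","e"] := rfl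
      have hs := any_two jwk
        (fun v => !(["sig","enc"].contains v))
        (fun v => !(["RS256","RS384","RS512","PS256","PS384","PS512"].contains v)) hnd
      simp only [hL, hR, Option.getD_some, hs]
      cases hu : dget? jwk "use" <;> cases ha : dget? jwk "alg" <;>
        cases hkid : dget? jwk "kid" <;>
        simp [dhas, hu, ha, hkty, hktyhas, hkid, not_none_eq_isSome, ← dhas_eq_any,
              Bool.and_assoc, Bool.and_comm]
    · by_cases h2 : kty = "EC"
      · subst h2
        have hL : List.lookup "EC" jwkAlgs
            = some ["ES256","ES384","ES512","ES256K"] := rfl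
        have hR : List.lookup "EC" jwkRequired = some ["kty","kid","crv","x","y"] := rfl
        have hs := any_two jwk
          (fun v => !(["sig","enc"].contains v))
          (fun v => !(["ES256","ES384","ES512","ES256K"].contains v)) hnd
        simp only [hL, hR, Option.getD_some, hs]
        cases hu : dget? jwk "use" <;> cases ha : dget? jwk "alg" <;>
          cases hkid : dget? jwk "kid" <;>
          simp [dhas, hu, ha, hkty, hktyhas, hkid, not_none_eq_isSome, ← dhas_eq_any,
              Bool.and_assoc, Bool.and_comm]
      · by_cases h3 : kty = "oct"
        · subst h3
          have hL : List.lookup "oct" jwkAlgs = some ["HS256","HS384","HS512"] := rfl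
          have hR : List.lookup "oct" jwkRequired = some ["kty","kid"] := rfl
          have hs := any_two jwk
            (fun v => !(["sig","enc"].contains v))
            (fun v => !(["HS256","HS384","HS512"].contains v)) hnd
          simp only [hL, hR, Option.getD_some, hs]
          cases hu : dget? jwk "use" <;> cases ha : dget? jwk "alg" <;>
            cases hkid : dget? jwk "kid" <;>
            simp [dhas, hu, ha, hkty, hktyhas, hkid, not_none_eq_isSome, ← dhas_eq_any,
              Bool.and_assoc, Bool.and_comm]
        · have e1 : (kty == "RSA") = false := by simp [h1]
          have e2 : (kty == "EC") = false := by simp [h2]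
          have e3 : (kty == "oct") = false := by simp [h3]
          have hL : List.lookup kty jwkAlgs = none := by
            simp [jwkAlgs, List.lookup, e1, e2, e3]
          simp only [hL, Option.getD_some]
          simp [h1, h2, h3]

-- ===== VERDICT (by name: the statement is the Claim_ definition above) =====
theorem validate_jwk_py_spec : Claim_equal_validate_jwk_py := by
  intro jwk _ hpre
  unfold Spec_validate_jwk_py
  exact validate_jwk_eq jwk hpre
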